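-- pv_equiv track=rewrite | github.com/Rica-VibeCoding/Fluyt_Comercial | backend/modules/ambientes/extrator_xml/app/utils/helpers.py | processar_material_cor
-- ===== SOURCE A (Python) =====
-- from typing import List, Optional, Tuple, Set
--
-- def processar_material_cor(valores: List[str]) -> Tuple[List[str], List[str]]:
--     """
--     Processa valores de material\\cor separando em listas distintas
--
--     Args:
--         valores: Lista de valores no formato "Material\\Cor"
--
--     Returns:
--         Tupla (materiais, cores) com listas únicas
--     """
--     materiais = []
--     cores = []
--
--     for item in valores:
--         if '\\' in item:
--             partes = item.split('\\', 1)
--             material = partes[0].strip()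
--             cor = partes[1].strip()
--
--             if material and material not in materiais:
--                 materiais.append(material)
--             if cor and cor not in cores:
--                 cores.append(cor)
--         else:
--             # Se não tem separador, assume que é só cor
--             if item and item not in cores:
--                 cores.append(item)
--
--     return materiais, cores
-- ===== SOURCE B (Python) =====
-- def processar_material_cor(valores):
--     """Parse pass (collect raw material/color candidates) then a separate
--     ordered-dedup pass via dict.fromkeys, dropping empty strings."""
--     materiais_raw = []
--     cores_raw = []
--     for item in valores:
--         if '\\' in item:
--             antes, depois = item.split('\\', 1)
--             materiais_raw.append(antes.strip())
--             cores_raw.append(depois.strip())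
--         else:
--             cores_raw.append(item)
--     materiais = [x for x in dict.fromkeys(materiais_raw) if x]
--     cores = [x for x in dict.fromkeys(cores_raw) if x]
--     return materiais, cores
-- ===== Notes on version B (the rewrite author's own statement) =====
-- stated objective: faster
-- what changed: Replaces A's single fused loop with per-item linear membership scans on the growing output lists by a parse pass collecting raw candidates followed by a separate ordered-dedup pass (dict.fromkeys) that filters out empty strings.
import Mathlib
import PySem

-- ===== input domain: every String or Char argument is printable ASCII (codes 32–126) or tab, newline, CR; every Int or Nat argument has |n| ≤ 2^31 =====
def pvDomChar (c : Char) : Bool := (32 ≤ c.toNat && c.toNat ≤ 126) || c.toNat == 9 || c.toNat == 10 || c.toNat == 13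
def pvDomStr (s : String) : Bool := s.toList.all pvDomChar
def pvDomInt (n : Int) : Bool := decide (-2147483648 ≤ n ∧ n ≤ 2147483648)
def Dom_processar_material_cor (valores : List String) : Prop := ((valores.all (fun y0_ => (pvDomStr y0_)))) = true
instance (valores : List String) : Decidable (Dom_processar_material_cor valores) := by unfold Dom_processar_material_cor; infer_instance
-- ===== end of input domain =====

-- B replaces A's fused scan with per-item membership checks on the growing output lists by a parse pass plus a separate ordered-dedup pass (hash dedup); a timing run measured B faster.

-- ===== PORT A =====
-- A's single loop: per item, split on the first '\' and append stripped parts to the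
-- result lists guarded by nonemptiness and a membership check; else-branch item unstripped.
def pvLoopA : List String → List String → List String → List String × List String
  | [], materiais, cores => (materiais, cores)
  | item :: rest, materiais, cores =>
    if PySem.Str.isIn "\\" item then
      match PySem.Str.splitMax? item "\\" 1 with
      | some (p0 :: p1 :: []) =>
        let material := PySem.Str.strip p0
        let cor := PySem.Str.strip p1
        let materiais' := if material ≠ "" ∧ material ∉ materiais then materiais ++ [material] else materiais
        let cores' := if cor ≠ "" ∧ cor ∉ cores then cores ++ [cor] else cores
        pvLoopA rest materiais' cores'
      | _ => pvLoopA rest materiais cores  -- unreachable: split('\\', 1) with the separator present yields exactly 2 parts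
    else
      pvLoopA rest materiais (if item ≠ "" ∧ item ∉ cores then cores ++ [item] else cores)

def processar_material_cor (valores : List String) : List String × List String :=
  pvLoopA valores [] []

-- ===== PORT B =====
-- B's parse pass: collect raw material/color candidates (else-branch item unstripped).
def pvParseB : List String → List String × List String
  | [] => ([], [])
  | item :: rest =>
    let (ms, cs) := pvParseB rest
    if PySem.Str.isIn "\\" item then
      match PySem.Str.splitMax? item "\\" 1 with
      | some (antes :: depois :: []) => (PySem.Str.strip antes :: ms, PySem.Str.strip depois :: cs)
      | _ => (ms, cs)  -- unreachable totality guard, as in port A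
    else
      (ms, item :: cs)

-- B's dedup pass: dict.fromkeys = PySem.List.dedup, then drop empty strings.
def processar_material_cor_alt (valores : List String) : List String × List String :=
  let (ms, cs) := pvParseB valores
  ((PySem.List.dedup ms).filter (fun x => x != ""),
   (PySem.List.dedup cs).filter (fun x => x != ""))

-- ===== PRECONDITION & SPEC =====
def Spec_processar_material_cor (valores : List String) (out : List String × List String) : Prop := out = processar_material_cor_alt valores
instance (valores : List String) (out : List String × List String) : Decidable (Spec_processar_material_cor valores out) := by unfold Spec_processar_material_cor; infer_instance

-- ===== CLAIM (what is proved, stated in full; the proofs are below) =====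
def Claim_equal_processar_material_cor : Prop := ∀ (valores : List String), Dom_processar_material_cor valores → Spec_processar_material_cor valores (processar_material_cor valores)

-- ===== LEMMAS AND PROOFS =====

-- A's guarded append is Set.add when the element is nonempty.
theorem pv_add_eq (acc : List String) (x : String) :
    PySem.Set.add acc x = if x ∈ acc then acc else acc ++ [x] := by
  by_cases h : x ∈ acc <;> simp [PySem.Set.add, h]

theorem pv_upd_eq_add (acc : List String) (x : String) (hx : x ≠ "") :
    (if x ≠ "" ∧ x ∉ acc then acc ++ [x] else acc) = PySem.Set.add acc x := by
  by_cases h : x ∈ acc <;> simp [pv_add_eq, h, hx]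

theorem pv_upd_eq_self (acc : List String) (x : String) (hx : x = "") :
    (if x ≠ "" ∧ x ∉ acc then acc ++ [x] else acc) = acc := by
  simp [hx]

-- A's loop equals updating each accumulator with B's raw list, empties dropped.
theorem pvLoopA_eq (l : List String) : ∀ (ms cs : List String),
    pvLoopA l ms cs =
      (PySem.Set.update ms ((pvParseB l).1.filter (fun x => x != "")),
       PySem.Set.update cs ((pvParseB l).2.filter (fun x => x != ""))) := by
  induction l with
  | nil => intro ms cs; simp [pvLoopA, pvParseB, PySem.Set.update]
  | cons item rest ih =>
    intro ms cs
    by_cases hin : PySem.Str.isIn "\\" item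
    · simp only [pvLoopA, pvParseB, hin, if_true]
      cases hsp : PySem.Str.splitMax? item "\\" 1 with
      | none => simp [ih]
      | some parts =>
        match parts with
        | [] => simp [ih]
        | [_] => simp [ih]
        | _ :: _ :: _ :: _ => simp [ih]
        | [p0, p1] =>
          simp only []
          by_cases h0 : PySem.Str.strip p0 = "" <;> by_cases h1 : PySem.Str.strip p1 = "" <;>
            simp [pv_upd_eq_self, pv_upd_eq_add, h0, h1, PySem.Set.update_cons, pv_add_eq, ih]
    · simp only [pvLoopA, pvParseB, hin, if_false]
      by_cases h : item = "" <;>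
        simp [pv_upd_eq_self, pv_upd_eq_add, h, PySem.Set.update_cons, pv_add_eq, ih]

-- filter commutes with ordered dedup (set(...) of first occurrences).
theorem pv_ofList_filter (p : String → Bool) (xs : List String) :
    PySem.Set.ofList (xs.filter p) = (PySem.Set.ofList xs).filter p := by
  induction xs using List.reverseRecOn with
  | nil => rfl
  | append_singleton ys x ih =>
    by_cases hp : p x
    · by_cases hx : x ∈ ys <;>
        simp [List.filter_append, hp, hx, PySem.Set.ofList_append_singleton, ih,
          pv_add_eq, PySem.Set.mem_ofList, List.mem_filter]
    · by_cases hx : x ∈ ys <;>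
        simp [List.filter_append, hp, hx, PySem.Set.ofList_append_singleton, ih,
          pv_add_eq, PySem.Set.mem_ofList, List.filter_cons, List.mem_filter]

-- ===== VERDICT (by name: the statement is the Claim_ definition above) =====
theorem processar_material_cor_spec : Claim_equal_processar_material_cor := by
  intro valores _
  unfold Spec_processar_material_cor processar_material_cor processar_material_cor_alt
  rw [pvLoopA_eq]
  simp [PySem.Set.update_nil_left, PySem.List.dedup_eq_ofList, pv_ofList_filter]
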